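-- pv_equiv track=rewrite | github.com/DNA-origamicon/NADOC | backend/core/scaffold_router.py | _intervals_overlap
-- ===== SOURCE A (Python) =====
-- def _intervals_overlap(
--     a: dict[str, list[tuple[int, int]]],
--     b: dict[str, list[tuple[int, int]]],
-- ) -> bool:
--     for helix_id, spans_a in a.items():
--         spans_b = b.get(helix_id, [])
--         for a_lo, a_hi in spans_a:
--             for b_lo, b_hi in spans_b:
--                 if a_lo <= b_hi and b_lo <= a_hi:
--                     return True
--     return False
-- ===== SOURCE B (Python) =====
-- def _helix_overlap(spans_a, spans_b):
--     # sort a-spans by lo, b-spans by hi; one merge-like sweep keeping the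
--     # max a_hi among a-spans whose lo <= current b_hi
--     sa = sorted(spans_a, key=lambda p: p[0])
--     sb = sorted(spans_b, key=lambda q: q[1])
--     i = 0
--     best = None
--     for b_lo, b_hi in sb:
--         while i < len(sa) and sa[i][0] <= b_hi:
--             if best is None or sa[i][1] > best:
--                 best = sa[i][1]
--             i += 1
--         if best is not None and b_lo <= best:
--             return True
--     return False
--
--
-- def _intervals_overlap(
--     a: dict[str, list[tuple[int, int]]],
--     b: dict[str, list[tuple[int, int]]],
-- ) -> bool:
--     return any(
--         _helix_overlap(spans_a, b.get(helix_id, []))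
--         for helix_id, spans_a in a.items()
--     )
-- ===== Notes on version B (the rewrite author's own statement) =====
-- stated objective: alternative
-- what changed: Per helix, B replaces A's all-pairs nested overlap scan by sorting a-spans by lo and b-spans by hi and doing one merge-style sweep that keeps the running max a_hi among a-spans with lo <= current b_hi (O((n+m)log(n+m)) per helix vs A's O(n*m), though a timing run's inputs hit A's early return so no speedup was measured).
import Mathlib
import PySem

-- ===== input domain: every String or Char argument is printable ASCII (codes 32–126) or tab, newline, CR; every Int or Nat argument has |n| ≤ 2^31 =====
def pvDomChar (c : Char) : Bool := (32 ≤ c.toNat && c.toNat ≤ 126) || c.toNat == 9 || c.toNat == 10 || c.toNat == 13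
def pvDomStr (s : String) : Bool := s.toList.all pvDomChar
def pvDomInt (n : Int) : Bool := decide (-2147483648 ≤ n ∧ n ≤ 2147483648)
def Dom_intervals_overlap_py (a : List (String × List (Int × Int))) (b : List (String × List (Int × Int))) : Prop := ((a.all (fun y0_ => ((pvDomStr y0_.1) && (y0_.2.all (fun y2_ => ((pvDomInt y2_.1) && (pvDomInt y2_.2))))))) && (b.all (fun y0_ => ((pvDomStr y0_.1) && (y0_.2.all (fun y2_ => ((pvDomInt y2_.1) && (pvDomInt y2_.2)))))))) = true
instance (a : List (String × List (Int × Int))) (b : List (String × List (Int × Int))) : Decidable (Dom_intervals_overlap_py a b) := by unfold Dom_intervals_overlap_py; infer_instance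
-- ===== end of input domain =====

-- B replaces A's all-pairs per-helix scan by sort + one merge-style sweep (objective: alternative algorithm).

-- ===== PORT A =====
-- inner loop: for b_lo, b_hi in spans_b: if a_lo <= b_hi and b_lo <= a_hi: return True
def pyAInner2 (alo ahi : Int) : List (Int × Int) → Bool
  | [] => false
  | (blo, bhi) :: r => if alo ≤ bhi ∧ blo ≤ ahi then true else pyAInner2 alo ahi r

-- middle loop: for a_lo, a_hi in spans_a
def pyAInner1 (sb : List (Int × Int)) : List (Int × Int) → Bool
  | [] => false
  | (alo, ahi) :: r => if pyAInner2 alo ahi sb then true else pyAInner1 sb r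

-- outer loop: for helix_id, spans_a in a.items(); spans_b = b.get(helix_id, [])
def pyAOuter (b : List (String × List (Int × Int))) : List (String × List (Int × Int)) → Bool
  | [] => false
  | (k, sa) :: rest =>
      if pyAInner1 (PySem.Dict.getD (PySem.Dict.mk b) k []) sa then true else pyAOuter b rest

def intervals_overlap_py (a : List (String × List (Int × Int))) (b : List (String × List (Int × Int))) : Bool :=
  pyAOuter b a

-- ===== PORT B =====
-- if best is None or hi > best: best = hi
def bumpBest (best : Option Int) (x : Int) : Option Int :=
  match best with
  | none => some x
  | some v => if x > v then some x else some v

-- best is not None and b_lo <= best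
def checkBest (best : Option Int) (blo : Int) : Bool :=
  match best with
  | none => false
  | some v => decide (blo ≤ v)

-- while i < len(sa) and sa[i][0] <= b_hi: best = bump; i += 1   (returns new best and the rest of sa)
def consume : List (Int × Int) → Int → Option Int → Option Int × List (Int × Int)
  | [], _, best => (best, [])
  | (alo, ahi) :: r, bhi, best =>
      if alo ≤ bhi then consume r bhi (bumpBest best ahi) else (best, (alo, ahi) :: r)

-- for b_lo, b_hi in sb: consume; if best is not None and b_lo <= best: return True
def sweepGo : List (Int × Int) → Option Int → List (Int × Int) → Bool
  | _, _, [] => false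
  | sa, best, (blo, bhi) :: rb =>
      match consume sa bhi best with
      | (best', sa') => if checkBest best' blo then true else sweepGo sa' best' rb

def helixOverlap (spansA spansB : List (Int × Int)) : Bool :=
  sweepGo (PySem.List.sorted spansA (fun p => p.1) false) none
          (PySem.List.sorted spansB (fun q => q.2) false)

def intervals_overlap_py_alt (a : List (String × List (Int × Int))) (b : List (String × List (Int × Int))) : Bool :=
  a.any (fun kv => helixOverlap kv.2 (PySem.Dict.getD (PySem.Dict.mk b) kv.1 []))

-- ===== PRECONDITION & SPEC =====
def Spec_intervals_overlap_py (a : List (String × List (Int × Int))) (b : List (String × List (Int × Int))) (out : Bool) : Prop := out = intervals_overlap_py_alt a b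
instance (a : List (String × List (Int × Int))) (b : List (String × List (Int × Int))) (out : Bool) : Decidable (Spec_intervals_overlap_py a b out) := by unfold Spec_intervals_overlap_py; infer_instance

-- ===== CLAIM (what is proved, stated in full; the proofs are below) =====
def Claim_equal_intervals_overlap_py : Prop := ∀ (a : List (String × List (Int × Int))) (b : List (String × List (Int × Int))), Dom_intervals_overlap_py a b → Spec_intervals_overlap_py a b (intervals_overlap_py a b)

-- ===== LEMMAS AND PROOFS =====

def ov (p q : Int × Int) : Bool := decide (p.1 ≤ q.2 ∧ q.1 ≤ p.2)

def foldBump (l : List (Int × Int)) (m : Option Int) : Option Int :=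
  l.foldl (fun m p => bumpBest m p.2) m

lemma any_perm {α : Type} {l l' : List α} (h : l.Perm l') (f : α → Bool) :
    l.any f = l'.any f := by
  rw [Bool.eq_iff_iff]
  simp only [List.any_eq_true]
  constructor
  · rintro ⟨x, hx, hf⟩; exact ⟨x, h.mem_iff.mp hx, hf⟩
  · rintro ⟨x, hx, hf⟩; exact ⟨x, h.mem_iff.mpr hx, hf⟩

lemma any_or {α : Type} (l : List α) (f g : α → Bool) :
    l.any (fun x => f x || g x) = (l.any f || l.any g) := by
  induction l with
  | nil => simp
  | cons x r ih =>
    simp only [List.any_cons, ih]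
    cases f x <;> cases g x <;> simp

lemma pyAInner2_eq (alo ahi : Int) (sb : List (Int × Int)) :
    pyAInner2 alo ahi sb = sb.any (fun q => ov (alo, ahi) q) := by
  induction sb with
  | nil => rfl
  | cons q r ih =>
    obtain ⟨blo, bhi⟩ := q
    simp only [pyAInner2, List.any_cons, ih, ov]
    split_ifs with h <;> simp [h]

lemma pyAInner1_eq (sb sa : List (Int × Int)) :
    pyAInner1 sb sa = sa.any (fun p => sb.any (fun q => ov p q)) := by
  induction sa with
  | nil => rfl
  | cons p r ih =>
    obtain ⟨alo, ahi⟩ := p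
    simp only [pyAInner1, List.any_cons, ih, pyAInner2_eq]
    split_ifs with h <;> simp [h]

lemma pyAOuter_eq (b : List (String × List (Int × Int))) (a : List (String × List (Int × Int))) :
    pyAOuter b a = a.any (fun kv =>
      kv.2.any (fun p => (PySem.Dict.getD (PySem.Dict.mk b) kv.1 []).any (fun q => ov p q))) := by
  induction a with
  | nil => rfl
  | cons kv rest ih =>
    obtain ⟨k, sa⟩ := kv
    simp only [pyAOuter, List.any_cons, ih, pyAInner1_eq]
    split_ifs with h <;> simp [h]

lemma checkBest_bump (m : Option Int) (x blo : Int) :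
    checkBest (bumpBest m x) blo = (checkBest m blo || decide (blo ≤ x)) := by
  cases m with
  | none => simp [bumpBest, checkBest]
  | some v =>
    simp only [bumpBest, checkBest]
    split_ifs with h <;> simp <;> omega

lemma checkBest_foldBump (l : List (Int × Int)) (m : Option Int) (blo : Int) :
    checkBest (foldBump l m) blo = (checkBest m blo || l.any (fun p => decide (blo ≤ p.2))) := by
  induction l generalizing m with
  | nil => simp [foldBump]
  | cons p r ih =>
    simp only [foldBump, List.foldl_cons] at *
    rw [ih, checkBest_bump]
    simp [Bool.or_assoc]

lemma foldBump_append (l₁ l₂ : List (Int × Int)) (m : Option Int) :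
    foldBump (l₁ ++ l₂) m = foldBump l₂ (foldBump l₁ m) := by
  simp [foldBump, List.foldl_append]

lemma consume_spec (sa : List (Int × Int)) (bhi : Int) (best : Option Int) :
    consume sa bhi best =
      (foldBump (sa.takeWhile (fun p => decide (p.1 ≤ bhi))) best,
       sa.dropWhile (fun p => decide (p.1 ≤ bhi))) := by
  induction sa generalizing best with
  | nil => simp [consume, foldBump]
  | cons p r ih =>
    obtain ⟨alo, ahi⟩ := p
    simp only [consume, List.takeWhile, List.dropWhile]
    split_ifs with h
    · simp only [ih, decide_eq_true h, foldBump, List.foldl_cons]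
    · simp [decide_eq_false h, foldBump]

lemma dropWhile_gt (bhi : Int) (sa : List (Int × Int))
    (hs : sa.Pairwise (fun p q => p.1 ≤ q.1)) :
    ∀ p ∈ sa.dropWhile (fun p => decide (p.1 ≤ bhi)), bhi < p.1 := by
  induction sa with
  | nil => simp
  | cons x r ih =>
    rcases List.pairwise_cons.mp hs with ⟨hx, hr⟩
    simp only [List.dropWhile]
    by_cases h : x.1 ≤ bhi
    · simp only [decide_eq_true h]
      exact ih hr
    · simp only [decide_eq_false h]
      intro p hp
      rcases List.mem_cons.mp hp with rfl | hp
      · omega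
      · have := hx p hp; omega

lemma sweepGo_spec :
    ∀ (sb sa c : List (Int × Int)),
      sa.Pairwise (fun p q => p.1 ≤ q.1) →
      sb.Pairwise (fun p q => p.2 ≤ q.2) →
      (∀ p ∈ c, ∀ q ∈ sb, p.1 ≤ q.2) →
      sweepGo sa (foldBump c none) sb =
        (c ++ sa).any (fun p => sb.any (fun q => ov p q)) := by
  intro sb
  induction sb with
  | nil => intro sa c _ _ _; simp [sweepGo]
  | cons q rb ih =>
    intro sa c hsa hsb hc
    obtain ⟨blo, bhi⟩ := q
    rcases List.pairwise_cons.mp hsb with ⟨hq, hrb⟩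
    set t := sa.takeWhile (fun p => decide (p.1 ≤ bhi)) with ht
    set sa' := sa.dropWhile (fun p => decide (p.1 ≤ bhi)) with hsa'
    have hsplit : t ++ sa' = sa := by simp [ht, hsa']
    have ht_le : ∀ p ∈ t, p.1 ≤ bhi := by
      intro p hp
      have := List.mem_takeWhile_imp hp
      simpa using this
    have hc_le : ∀ p ∈ c, p.1 ≤ bhi := fun p hp =>
      hc p hp (blo, bhi) (List.mem_cons_self)
    have hct_le : ∀ p ∈ c ++ t, p.1 ≤ bhi := by
      intro p hp
      rcases List.mem_append.mp hp with h | h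
      · exact hc_le p h
      · exact ht_le p h
    have hdrop : ∀ p ∈ sa', bhi < p.1 := dropWhile_gt bhi sa hsa
    -- evaluate one step of the sweep
    have hstep : sweepGo sa (foldBump c none) ((blo, bhi) :: rb) =
        (if checkBest (foldBump (c ++ t) none) blo then true
         else sweepGo sa' (foldBump (c ++ t) none) rb) := by
      simp only [sweepGo, consume_spec, ← ht, ← hsa', foldBump_append]
    -- the check equals "some already-seen span overlaps (blo, bhi)"
    have hcheck : checkBest (foldBump (c ++ t) none) blo =
        (c ++ sa).any (fun p => ov p (blo, bhi)) := by
      rw [checkBest_foldBump]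
      simp only [checkBest, Bool.false_or]
      rw [← hsplit, ← List.append_assoc, List.any_append (xs := c ++ t)]
      have h1 : (c ++ t).any (fun p => decide (blo ≤ p.2)) =
          (c ++ t).any (fun p => ov p (blo, bhi)) := by
        apply PySem.List.any_congr_mem
        intro p hp
        have := hct_le p hp
        simp [ov]; omega
      have h2 : sa'.any (fun p => ov p (blo, bhi)) = false := by
        simp only [List.any_eq_false]
        intro p hp
        have := hdrop p hp
        simp [ov]; omega
      rw [h1, h2, Bool.or_false]
    rw [hstep]
    by_cases hchk : checkBest (foldBump (c ++ t) none) blo = true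
    · rw [if_pos hchk]
      have : (c ++ sa).any (fun p => ov p (blo, bhi)) = true := by rw [← hcheck]; exact hchk
      rcases List.any_eq_true.mp this with ⟨p, hp, hov⟩
      symm
      exact List.any_eq_true.mpr ⟨p, hp, by simp [List.any_cons, hov]⟩
    · rw [if_neg hchk]
      have hrec := ih sa' (c ++ t)
          (List.Pairwise.sublist (List.dropWhile_sublist _) hsa) hrb
          (by
            intro p hp q' hq'
            rcases List.mem_append.mp hp with h | h
            · exact hc p h q' (List.mem_cons_of_mem _ hq')
            · exact le_trans (ht_le p h) (hq q' hq'))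
      rw [hrec]
      have hre : c ++ t ++ sa' = c ++ sa := by rw [List.append_assoc, hsplit]
      rw [hre]
      have hexp : (c ++ sa).any (fun p => ((blo, bhi) :: rb).any (fun q => ov p q)) =
          ((c ++ sa).any (fun p => ov p (blo, bhi)) ||
           (c ++ sa).any (fun p => rb.any (fun q => ov p q))) := by
        simp only [List.any_cons]
        exact any_or _ _ _
      rw [hexp, ← hcheck]
      simp only [Bool.not_eq_true] at hchk
      rw [hchk, Bool.false_or]

lemma helixOverlap_eq (sa sb : List (Int × Int)) :
    helixOverlap sa sb = sa.any (fun p => sb.any (fun q => ov p q)) := by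
  unfold helixOverlap
  have h := sweepGo_spec (PySem.List.sorted sb (fun q => q.2) false)
      (PySem.List.sorted sa (fun p => p.1) false) []
      (PySem.List.sorted_pairwise sa (fun p => p.1))
      (PySem.List.sorted_pairwise sb (fun q => q.2))
      (by simp)
  simp only [List.nil_append] at h
  have hnone : foldBump [] none = none := rfl
  rw [← hnone, h]
  rw [any_perm (PySem.List.sorted_perm sa (fun p => p.1) false)]
  apply PySem.List.any_congr_mem
  intro p _
  exact any_perm (PySem.List.sorted_perm sb (fun q => q.2) false) _

-- ===== VERDICT (by name: the statement is the Claim_ definition above) =====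
theorem intervals_overlap_py_spec : Claim_equal_intervals_overlap_py := by
  intro a b _
  unfold Spec_intervals_overlap_py intervals_overlap_py intervals_overlap_py_alt
  rw [pyAOuter_eq]
  apply PySem.List.any_congr_mem
  intro kv _
  exact (helixOverlap_eq _ _).symm
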